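-- pv_equiv track=rewrite | github.com/TanviMehra/Python-Codes | Arrays,Strings/meanderingArray.py | meandering
-- ===== SOURCE A (Python) =====
-- import heapq
--
-- def meandering(unsorted):
--     heap1,heap2= [],[]
--     for val in unsorted:
--         heapq.heappush(heap1,-val)
--         heapq.heappush(heap2,val)
--     out=[]
--     while len(out)!=len(unsorted):
--         out.append(-heapq.heappop(heap1))
--         if len(out)!= len(unsorted):
--             out.append(heapq.heappop(heap2))
--     return out
-- ===== SOURCE B (Python) =====
-- def meandering(unsorted):
--     s = sorted(unsorted)
--     out = []
--     left, right = 0, len(s) - 1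
--     while left <= right:
--         out.append(s[right])
--         if left != right:
--             out.append(s[left])
--         left += 1
--         right -= 1
--     return out
-- ===== Notes on version B (the rewrite author's own statement) =====
-- stated objective: faster
-- what changed: Replaces the two heaps (n pushes each, then alternating pops with heap sifting) with one sort and a two-pointer inward scan over the sorted list.
import Mathlib
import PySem

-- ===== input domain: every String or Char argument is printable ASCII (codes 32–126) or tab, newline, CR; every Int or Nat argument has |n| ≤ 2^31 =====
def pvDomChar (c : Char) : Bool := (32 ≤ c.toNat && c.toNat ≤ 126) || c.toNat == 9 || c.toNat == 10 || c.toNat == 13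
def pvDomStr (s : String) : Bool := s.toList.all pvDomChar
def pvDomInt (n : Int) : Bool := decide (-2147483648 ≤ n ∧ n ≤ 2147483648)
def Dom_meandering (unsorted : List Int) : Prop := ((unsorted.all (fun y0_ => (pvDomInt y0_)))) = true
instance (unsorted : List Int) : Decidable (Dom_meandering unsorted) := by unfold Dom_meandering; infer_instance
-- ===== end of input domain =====

-- B replaces A's two heaps (n pushes each, then alternating pops) with one sort and a
-- two-pointer inward scan over the sorted list; same asymptotics, measurably faster constants.


-- ===== PORT A =====
-- heapq is modelled as an ascending sorted list: heappush = ordered insert, heappop = head.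
-- This is exact with respect to the sequence of popped values (heappop returns the minimum
-- of the heap's contents), which is all that A's output observes; heapq's internal array
-- layout is not observable in A's result.
def heappush (heap : List Int) (item : Int) : List Int :=
  PySem.List.insertBy (fun a b => decide (a < b)) item heap

-- heappop: none = IndexError on an empty heap (never reached by A's loop)
def heappop? (heap : List Int) : Option (Int × List Int) :=
  match heap with
  | [] => none
  | x :: xs => some (x, xs)

-- the while loop of A: rem = len(unsorted) - len(out) pops still to perform
def meanderLoop : Nat → List Int → List Int → List Int
  | 0, _, _ => []
  | rem + 1, h1, h2 =>
    match heappop? h1 with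
    | none => []            -- unreachable: heapq.heappop would raise IndexError
    | some (a, h1') =>
      (-a) :: (match rem with
        | 0 => []
        | m + 1 =>
          match heappop? h2 with
          | none => []      -- unreachable
          | some (b, h2') => b :: meanderLoop m h1' h2')

def meandering (unsorted : List Int) : List Int :=
  let heaps := unsorted.foldl
    (fun (p : List Int × List Int) val => (heappush p.1 (-val), heappush p.2 val)) ([], [])
  meanderLoop unsorted.length heaps.1 heaps.2

-- ===== PORT B =====
-- the while loop of B: two pointers moving inward over the sorted list s
-- (fuel only for termination; s.length + 1 is more than the number of iterations)
def altLoop (s : List Int) : Nat → Int → Int → List Int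
  | 0, _, _ => []
  | f + 1, l, r =>
    if l ≤ r then
      match PySem.List.pyGet? s r with
      | none => []          -- unreachable: IndexError
      | some vr =>
        if l ≠ r then
          match PySem.List.pyGet? s l with
          | none => []      -- unreachable
          | some vl => vr :: vl :: altLoop s f (l + 1) (r - 1)
        else vr :: altLoop s f (l + 1) (r - 1)
    else []

def meandering_alt (unsorted : List Int) : List Int :=
  let s := PySem.List.sorted unsorted (fun x => x) false
  altLoop s (s.length + 1) 0 ((s.length : Int) - 1)

-- ===== PRECONDITION & SPEC =====
def Spec_meandering (unsorted : List Int) (out : List Int) : Prop := out = meandering_alt unsorted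
instance (unsorted : List Int) (out : List Int) : Decidable (Spec_meandering unsorted out) := by unfold Spec_meandering; infer_instance

-- ===== CLAIM (what is proved, stated in full; the proofs are below) =====
def Claim_equal_meandering : Prop := ∀ (unsorted : List Int), Dom_meandering unsorted → Spec_meandering unsorted (meandering unsorted)

-- ===== LEMMAS AND PROOFS =====

-- the pair-fold of A is the pair of the two single folds
lemma foldl_pair (xs : List Int) (h1 h2 : List Int) :
    xs.foldl (fun (p : List Int × List Int) val => (heappush p.1 (-val), heappush p.2 val)) (h1, h2)
      = (xs.foldl (fun h val => heappush h (-val)) h1, xs.foldl (fun h val => heappush h val) h2) := by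
  induction xs generalizing h1 h2 with
  | nil => rfl
  | cons x xs ih => simp [List.foldl_cons, ih]

lemma heap2_eq_sorted (xs : List Int) :
    xs.foldl (fun h val => heappush h val) [] = PySem.List.sorted xs (fun x => x) false := by
  rw [PySem.List.sorted_eq_foldl_insertBy]
  rfl

lemma heap1_eq_sorted_neg (xs : List Int) :
    xs.foldl (fun h val => heappush h (-val)) [] = PySem.List.sorted (xs.map (fun v => -v)) (fun x => x) false := by
  rw [PySem.List.sorted_eq_foldl_insertBy, List.foldl_map]
  rfl

-- the ascending sort of the negations is the pointwise negation of the reversed ascending sort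
lemma sorted_neg_eq (xs : List Int) :
    PySem.List.sorted (xs.map (fun v => -v)) (fun x => x) false
      = ((PySem.List.sorted xs (fun x => x) false).reverse).map (fun v => -v) := by
  apply PySem.List.sorted_id_eq_of_perm_of_pairwise
  · exact ((List.reverse_perm _).trans (PySem.List.sorted_perm xs (fun x => x) false)).map _
  · rw [List.pairwise_map, List.pairwise_reverse]
    have h := PySem.List.sorted_pairwise xs (fun x => x)
    exact h.imp (by intro a b hab; simp; omega)

lemma altLoop_done (s : List Int) (f : Nat) (l r : Int) (h : r < l) :
    altLoop s f l r = [] := by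
  cases f with
  | zero => rfl
  | succ f => simp [altLoop, not_le.mpr h]

lemma altLoop_succ (s : List Int) (f : Nat) (l r : Int) :
    altLoop s (f + 1) l r =
      (if l ≤ r then
        match PySem.List.pyGet? s r with
        | none => []
        | some vr =>
          if l ≠ r then
            match PySem.List.pyGet? s l with
            | none => []
            | some vl => vr :: vl :: altLoop s f (l + 1) (r - 1)
          else vr :: altLoop s f (l + 1) (r - 1)
      else []) := rfl

lemma meanderLoop_zero (h1 h2 : List Int) : meanderLoop 0 h1 h2 = [] := rfl

lemma meanderLoop_one_cons (a : Int) (h1 h2 : List Int) :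
    meanderLoop 1 (a :: h1) h2 = [-a] := rfl

lemma meanderLoop_succ_succ (m : Nat) (a b : Int) (h1 h2 : List Int) :
    meanderLoop (m + 2) (a :: h1) (b :: h2) = -a :: b :: meanderLoop m h1 h2 := rfl

-- the central loop correspondence: with s the ascending sort, pointers l ≤ r < |s|,
-- A's remaining-pop loop on the suffixes of the two sorted "heaps" equals B's two-pointer loop
lemma loop_eq (s : List Int) (f l r : Nat) (hr : r < s.length) (hl : l ≤ r)
    (hf : r + 1 - l ≤ 2 * f + 2) :
    altLoop s (f + 1) (l : Int) (r : Int)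
      = meanderLoop (r + 1 - l) (((s.reverse).drop (s.length - 1 - r)).map (fun v => -v)) (s.drop l) := by
  induction f generalizing l r with
  | zero =>
    have hd1 : s.length - 1 - r < s.reverse.length := by simp; omega
    have hdrop1 : (s.reverse).drop (s.length - 1 - r)
        = s.reverse[s.length - 1 - r] :: (s.reverse).drop (s.length - 1 - r + 1) :=
      List.drop_eq_getElem_cons hd1
    have hrev : s.reverse[s.length - 1 - r]'hd1 = s[r]'hr := by
      rw [List.getElem_reverse]; congr 1; omega
    have hdropl : s.drop l = s[l]'(by omega) :: s.drop (l + 1) := List.drop_eq_getElem_cons (by omega)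
    rcases Nat.lt_or_ge l r with hlt | hge
    · -- remaining = 2, i.e. r = l + 1
      obtain ⟨m, hm⟩ : ∃ m, r + 1 - l = m + 2 := ⟨0, by omega⟩
      have hm0 : m = 0 := by omega
      have hne : (l : Int) ≠ (r : Int) := by exact_mod_cast (by omega : l ≠ r)
      have hd2 : s.length - 1 - r + 1 < s.reverse.length := by simp; omega
      have hdrop2 : (s.reverse).drop (s.length - 1 - r + 1)
          = s.reverse[s.length - 1 - r + 1] :: (s.reverse).drop (s.length - 1 - r + 2) :=
        List.drop_eq_getElem_cons hd2
      have hrev2 : s.reverse[s.length - 1 - r + 1]'hd2 = s[l]'(by omega) := by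
        rw [List.getElem_reverse]; congr 1; omega
      rw [altLoop_succ]
      simp only [if_pos (by exact_mod_cast hl : (l:Int) ≤ r),
        PySem.List.pyGet?_natCast, List.getElem?_eq_getElem hr,
        List.getElem?_eq_getElem (show l < s.length by omega)]
      rw [if_pos hne, hm, hdrop1, hrev, hdropl, hdrop2, hrev2, List.map_cons, List.map_cons,
        meanderLoop_succ_succ, hm0, meanderLoop_zero,
        altLoop_done s 0 ((l:Int)+1) ((r:Int)-1) (by omega)]
      simp
    · -- remaining = 1, i.e. l = r
      have hrl : l = r := by omega
      rw [altLoop_succ]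
      simp only [if_pos (by exact_mod_cast hl : (l:Int) ≤ r), PySem.List.pyGet?_natCast,
        List.getElem?_eq_getElem hr]
      rw [if_neg (by simp [hrl]), show r + 1 - l = 1 by omega, hdrop1, hrev, List.map_cons,
        meanderLoop_one_cons, altLoop_done s 0 ((l:Int)+1) ((r:Int)-1) (by omega)]
      simp
  | succ f ih =>
    have hd1 : s.length - 1 - r < s.reverse.length := by simp; omega
    have hdrop1 : (s.reverse).drop (s.length - 1 - r)
        = s.reverse[s.length - 1 - r] :: (s.reverse).drop (s.length - 1 - r + 1) :=
      List.drop_eq_getElem_cons hd1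
    have hrev : s.reverse[s.length - 1 - r]'hd1 = s[r]'hr := by
      rw [List.getElem_reverse]; congr 1; omega
    have hdropl : s.drop l = s[l]'(by omega) :: s.drop (l + 1) := List.drop_eq_getElem_cons (by omega)
    rcases Nat.lt_or_ge l r with hlt | hge
    · -- remaining ≥ 2: one double step, then the induction hypothesis
      obtain ⟨m, hm⟩ : ∃ m, r + 1 - l = m + 2 := ⟨r - 1 - l, by omega⟩
      have hne : (l : Int) ≠ (r : Int) := by exact_mod_cast (by omega : l ≠ r)
      have hd2 : s.length - 1 - r + 1 < s.reverse.length := by simp; omega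
      have hdrop2 : (s.reverse).drop (s.length - 1 - r + 1)
          = s.reverse[s.length - 1 - r + 1] :: (s.reverse).drop (s.length - 1 - r + 2) :=
        List.drop_eq_getElem_cons hd2
      rw [altLoop_succ]
      simp only [if_pos (by exact_mod_cast hl : (l:Int) ≤ r),
        PySem.List.pyGet?_natCast, List.getElem?_eq_getElem hr,
        List.getElem?_eq_getElem (show l < s.length by omega)]
      rw [if_pos hne, hm, hdrop1, hrev, hdropl, List.map_cons, meanderLoop_succ_succ]
      rcases Nat.eq_zero_or_pos m with hm0 | hmpos
      · -- r = l + 1: both loops finish here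
        have : r = l + 1 := by omega
        rw [hm0, meanderLoop_zero, altLoop_done s (f + 1) ((l:Int)+1) ((r:Int)-1) (by omega)]
        simp
      · have hstep : altLoop s (f + 1) ((l : Int) + 1) ((r : Int) - 1)
            = meanderLoop ((r - 1) + 1 - (l + 1))
                (((s.reverse).drop (s.length - 1 - (r - 1))).map (fun v => -v)) (s.drop (l + 1)) := by
          have hc1 : ((l + 1 : Nat) : Int) = (l : Int) + 1 := by push_cast; ring
          have hc2 : ((r - 1 : Nat) : Int) = (r : Int) - 1 := by omega
          rw [← hc1, ← hc2]
          exact ih (l + 1) (r - 1) (by omega) (by omega) (by omega)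
        rw [hstep, show (r - 1) + 1 - (l + 1) = m by omega,
          show s.length - 1 - (r - 1) = s.length - 1 - r + 1 by omega]
        simp
    · -- remaining = 1, i.e. l = r
      have hrl : l = r := by omega
      rw [altLoop_succ]
      simp only [if_pos (by exact_mod_cast hl : (l:Int) ≤ r), PySem.List.pyGet?_natCast,
        List.getElem?_eq_getElem hr]
      rw [if_neg (by simp [hrl]), show r + 1 - l = 1 by omega, hdrop1, hrev, List.map_cons,
        meanderLoop_one_cons, altLoop_done s (f + 1) ((l:Int)+1) ((r:Int)-1) (by omega)]
      simp

-- ===== VERDICT (by name: the statement is the Claim_ definition above) =====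
theorem meandering_spec : Claim_equal_meandering := by
  intro unsorted _
  unfold Spec_meandering meandering meandering_alt
  rw [foldl_pair]
  simp only [heap1_eq_sorted_neg, heap2_eq_sorted, sorted_neg_eq]
  set s := PySem.List.sorted unsorted (fun x => x) false with hs
  have hlen : s.length = unsorted.length := PySem.List.length_sorted unsorted (fun x => x) false
  rcases Nat.eq_zero_or_pos unsorted.length with h0 | hpos
  · have hs0 : s = [] := List.eq_nil_of_length_eq_zero (by omega)
    simp [h0, hs0, meanderLoop]
    exact altLoop_done [] 1 0 (-1) (by omega)
  · have hcast : ((s.length : Int) - 1) = (((unsorted.length - 1 : Nat)) : Int) := by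
      rw [hlen]; omega
    rw [hcast, show (0 : Int) = ((0 : Nat) : Int) by rfl]
    rw [loop_eq s s.length 0 (unsorted.length - 1) (by omega) (by omega) (by omega)]
    rw [show unsorted.length - 1 + 1 - 0 = unsorted.length by omega,
      show s.length - 1 - (unsorted.length - 1) = 0 by omega, List.drop_zero, List.drop_zero]
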